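-- pv_equiv track=rewrite | github.com/tanyaweaver/code-katas | src/pattern_matching.py | regex_matching
-- ===== SOURCE A (Python) =====
-- def compare_strings(s1, s2):
--     match = False
--     if s1 and s2 and len(s1) == len(s2):
--         i = 0
--         while i < len(s1):
--             if s1[i] != s2[i]:
--                 break
--             i += 1
--         if i == len(s1):
--             match = True
--     return match
--
-- def regex_matching(pattern, test):
--     # import pdb; pdb.set_trace()
--     match = False
--     if pattern[0] == '^' and pattern[-1] == '$':
--         match = compare_strings(pattern[1:-1], test)
--     elif pattern[0] == '^':
--         match = compare_strings(pattern[1:], test[:len(pattern)-1])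
--     elif pattern[-1] == '$':
--         match = compare_strings(pattern[:-1], test[len(test) - len(pattern) + 1:])
--     else:
--         string = test
--         while not match and string and len(string) >= len(pattern):
--             index = string.find(pattern[0])
--             if index != -1:
--                 match = compare_strings(pattern, string[index:index+len(pattern)])
--                 if not match:
--                     string = string[index + 1:]
--             else:
--                 break
--     return match
-- ===== SOURCE B (Python) =====
-- def regex_matching(pattern, test):
--     # Only ^ and $ anchors are supported; everything else is a literal match.
--     if pattern.startswith('^'):
--         if pattern.endswith('$'):
--             core = pattern[1:-1]
--             return core != '' and core == test
--         core = pattern[1:]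
--         return core != '' and test.startswith(core)
--     if pattern.endswith('$'):
--         core = pattern[:-1]
--         return core != '' and test.endswith(core)
--     return pattern in test
-- ===== Notes on version B (the rewrite author's own statement) =====
-- stated objective: idiomatic
-- what changed: replaces the hand-written char-by-char compare loop and the restart-at-next-first-char search loop with direct startswith/endswith/equality/'in' checks, one per anchor case
import Mathlib
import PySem

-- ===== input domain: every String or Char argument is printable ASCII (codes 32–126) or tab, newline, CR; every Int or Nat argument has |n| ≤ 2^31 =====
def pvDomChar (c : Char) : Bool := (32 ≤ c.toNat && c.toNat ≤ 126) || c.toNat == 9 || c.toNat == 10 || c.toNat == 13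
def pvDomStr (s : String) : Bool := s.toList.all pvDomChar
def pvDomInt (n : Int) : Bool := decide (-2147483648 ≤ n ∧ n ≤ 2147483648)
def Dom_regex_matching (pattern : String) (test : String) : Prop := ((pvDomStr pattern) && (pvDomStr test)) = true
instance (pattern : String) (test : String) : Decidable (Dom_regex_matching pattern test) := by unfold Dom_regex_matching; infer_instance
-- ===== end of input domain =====

-- B replaces A's hand-written char-compare loop and restart-after-first-char search loop with
-- direct startswith / endswith / equality / substring checks, one per anchor case (idiomatic).

-- ===== PORT A =====
-- the `while i < len(s1)` loop of compare_strings: walks both strings in step, breaks at a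
-- mismatch; under the guard len(s1) == len(s2), "i == len(s1)" is "no mismatch found".
def pvCsLoop : List Char → List Char → Bool
  | a :: as, b :: bs => if a ≠ b then false else pvCsLoop as bs
  | _, _ => true

-- compare_strings, on the char lists
def pvCompare (s1 s2 : List Char) : Bool :=
  if s1 ≠ [] ∧ s2 ≠ [] ∧ s1.length = s2.length then pvCsLoop s1 s2 else false

-- the `while not match and string and len(string) >= len(pattern)` loop of A's else-branch;
-- PySem.Chars.find s (p.take 1) is string.find(pattern[0]) (p nonempty under Pre_).
def pvSearchLoop (p : List Char) (s : List Char) : Bool :=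
  if h : s ≠ [] ∧ p.length ≤ s.length then
    if hi : PySem.Chars.find s (p.take 1) ≠ -1 then
      if pvCompare p (PySem.List.slice s (some (PySem.Chars.find s (p.take 1)))
                       (some (PySem.Chars.find s (p.take 1) + p.length))) then true
      else pvSearchLoop p (PySem.List.slice s (some (PySem.Chars.find s (p.take 1) + 1)) none)
    else false
  else false
termination_by s.length
decreasing_by
  have h0 : (0:Int) ≤ PySem.Chars.find s (p.take 1) := by
    have := PySem.Chars.neg_one_le_find s (p.take 1); omega
  rw [PySem.List.slice_from s (by omega : (0:Int) ≤ PySem.Chars.find s (p.take 1) + 1)]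
  have hs : s.length ≠ 0 := by
    intro hz
    exact h.1 (by cases s <;> simp_all)
  simp only [List.length_drop]
  omega

-- regex_matching on the char lists; pattern[-1] of a nonempty list is its last element,
-- the [] branch is pattern[0] raising IndexError (outside Pre_).
def pvRegexA (p t : List Char) : Bool :=
  match p with
  | [] => false
  | c0 :: rest =>
    if c0 = '^' ∧ (c0 :: rest).getLast (List.cons_ne_nil c0 rest) = '$' then
      pvCompare (PySem.List.slice (c0 :: rest) (some 1) (some (-1))) t
    else if c0 = '^' then
      pvCompare (PySem.List.slice (c0 :: rest) (some 1) none)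
                (PySem.List.slice t none (some (((c0 :: rest).length : Int) - 1)))
    else if (c0 :: rest).getLast (List.cons_ne_nil c0 rest) = '$' then
      pvCompare (PySem.List.slice (c0 :: rest) none (some (-1)))
                (PySem.List.slice t (some ((t.length : Int) - ((c0 :: rest).length : Int) + 1)) none)
    else pvSearchLoop (c0 :: rest) t

def regex_matching (pattern : String) (test : String) : Bool :=
  pvRegexA pattern.toList test.toList

-- ===== PORT B =====
def pvRegexB (p t : List Char) : Bool :=
  if PySem.Chars.startswith p ['^'] then
    if PySem.Chars.endswith p ['$'] then
      decide (PySem.List.slice p (some 1) (some (-1)) ≠ []) &&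
        (PySem.List.slice p (some 1) (some (-1)) == t)
    else
      decide (PySem.List.slice p (some 1) none ≠ []) &&
        PySem.Chars.startswith t (PySem.List.slice p (some 1) none)
  else if PySem.Chars.endswith p ['$'] then
    decide (PySem.List.slice p none (some (-1)) ≠ []) &&
      PySem.Chars.endswith t (PySem.List.slice p none (some (-1)))
  else PySem.Chars.isIn p t

def regex_matching_alt (pattern : String) (test : String) : Bool :=
  pvRegexB pattern.toList test.toList

-- ===== PRECONDITION & SPEC =====
-- Pre_ excludes only the empty pattern, on which A raises IndexError at pattern[0].
def Pre_regex_matching (pattern : String) (test : String) : Prop := pattern.toList ≠ []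
instance (pattern : String) (test : String) : Decidable (Pre_regex_matching pattern test) := by
  unfold Pre_regex_matching; infer_instance

def pvWitness_regex_matching : String × String := ("^ab", "abc")

def Spec_regex_matching (pattern : String) (test : String) (out : Bool) : Prop :=
  out = regex_matching_alt pattern test
instance (pattern : String) (test : String) (out : Bool) : Decidable (Spec_regex_matching pattern test out) := by
  unfold Spec_regex_matching; infer_instance

-- ===== CLAIM (what is proved, stated in full; the proofs are below) =====
def Claim_equal_regex_matching : Prop := ∀ (pattern : String) (test : String), Dom_regex_matching pattern test → Pre_regex_matching pattern test → Spec_regex_matching pattern test (regex_matching pattern test)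

-- ===== LEMMAS AND PROOFS =====

-- pvCsLoop on equal-length lists is list equality
theorem pvCsLoop_eq (a b : List Char) (h : a.length = b.length) : pvCsLoop a b = (a == b) := by
  induction a generalizing b with
  | nil => cases b with
    | nil => rfl
    | cons y ys => simp at h
  | cons x xs ih =>
    cases b with
    | nil => simp at h
    | cons y ys =>
      simp only [List.length_cons, Nat.add_right_cancel_iff] at h
      by_cases hxy : x = y
      · subst hxy
        simp [pvCsLoop, ih ys h]
      · simp [pvCsLoop, hxy]

-- compare_strings is "nonempty and equal"
theorem pvCompare_eq (a b : List Char) : pvCompare a b = (decide (a ≠ []) && a == b) := by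
  unfold pvCompare
  by_cases hg : a ≠ [] ∧ b ≠ [] ∧ a.length = b.length
  · rw [if_pos hg, pvCsLoop_eq a b hg.2.2]
    simp [hg.1]
  · rw [if_neg hg]
    by_cases ha : a = []
    · simp [ha]
    · by_cases hab : a = b
      · exact absurd ⟨ha, hab ▸ ha, by rw [hab]⟩ hg
      · simp [hab]

theorem pvCompare_eq_prefix (a b : List Char) :
    pvCompare a (b.take a.length) = (decide (a ≠ []) && PySem.Chars.startswith b a) := by
  rw [pvCompare_eq]
  by_cases hp : a <+: b
  · have h1 : a = b.take a.length := List.prefix_iff_eq_take.mp hp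
    have h2 := (PySem.Chars.startswith_iff b a).mpr hp
    simp [← h1, h2]
  · have h1 : ¬ a = b.take a.length := fun h => hp (List.prefix_iff_eq_take.mpr h)
    have h2 : PySem.Chars.startswith b a = false := by
      cases hsw : PySem.Chars.startswith b a
      · rfl
      · exact absurd ((PySem.Chars.startswith_iff b a).mp hsw) hp
    simp [h1, h2]

theorem pvCompare_eq_suffix (a b : List Char) :
    pvCompare a (b.drop (b.length - a.length)) = (decide (a ≠ []) && PySem.Chars.endswith b a) := by
  rw [pvCompare_eq]
  by_cases hp : a <:+ b
  · have h1 : a = b.drop (b.length - a.length) := List.suffix_iff_eq_drop.mp hp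
    have h2 := (PySem.Chars.endswith_iff b a).mpr hp
    simp [← h1, h2]
  · have h1 : ¬ a = b.drop (b.length - a.length) := fun h => hp (List.suffix_iff_eq_drop.mpr h)
    have h2 : PySem.Chars.endswith b a = false := by
      cases hsw : PySem.Chars.endswith b a
      · rfl
      · exact absurd ((PySem.Chars.endswith_iff b a).mp hsw) hp
    simp [h1, h2]

-- infix ↔ some tail-drop has p as prefix
theorem infix_iff_exists_drop (p s : List Char) : p <:+: s ↔ ∃ j, p <+: s.drop j := by
  rw [← PySem.Chars.isIn_iff_infix, ← PySem.Chars.exists_prefix_drop_iff_isIn]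

-- A's else-branch search loop computes substring containment (for nonempty pattern)
theorem pvSearchLoop_eq_isIn (p : List Char) (hp : p ≠ []) :
    ∀ s, pvSearchLoop p s = PySem.Chars.isIn p s := by
  intro s
  induction hind : s.length using Nat.strong_induction_on generalizing s with
  | _ n ih =>
  subst hind
  rw [pvSearchLoop]
  obtain ⟨c, rest, rfl⟩ := List.exists_cons_of_ne_nil hp
  by_cases hg : s ≠ [] ∧ (c :: rest).length ≤ s.length
  · rw [dif_pos hg]
    simp only [List.take_succ_cons, List.take_zero]
    by_cases hf : PySem.Chars.find s [c] ≠ -1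
    · rw [dif_pos hf]
      have h0 : (0:Int) ≤ PySem.Chars.find s [c] := by
        have := PySem.Chars.neg_one_le_find s [c]; omega
      set iN : Nat := (PySem.Chars.find s [c]).toNat with hiN
      have hfspec := PySem.Chars.find_spec (s := s) (sub := [c]) h0
      have hiNlt : iN < s.length := by
        rcases hfspec.1 with ⟨t2, ht2⟩
        have hne : (s.drop iN).length ≠ 0 := by rw [← ht2]; simp
        simp only [List.length_drop] at hne
        omega
      have hslice : PySem.List.slice s (some (PySem.Chars.find s [c]))
          (some (PySem.Chars.find s [c] + (c :: rest).length)) = (s.drop iN).take (c :: rest).length := by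
        rw [PySem.List.slice_toNat s h0 (by omega)]
        congr 1
        omega
      rw [hslice, pvCompare_eq]
      have hslice2 : PySem.List.slice s (some (PySem.Chars.find s [c] + 1)) none
          = s.drop (iN + 1) := by
        rw [PySem.List.slice_from s (by omega : (0:Int) ≤ PySem.Chars.find s [c] + 1)]
        congr 1
        omega
      rw [hslice2]
      by_cases hm : (c :: rest) = (s.drop iN).take (c :: rest).length
      · -- match at the found index
        have hpre : (c :: rest) <+: s.drop iN := List.prefix_iff_eq_take.mpr hm
        have hisin : PySem.Chars.isIn (c :: rest) s = true := by
          rw [PySem.Chars.isIn_iff_infix, infix_iff_exists_drop]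
          exact ⟨iN, hpre⟩
        have hcond : (decide ((c :: rest) ≠ []) && ((c :: rest) == (s.drop iN).take (c :: rest).length)) = true := by
          rw [← hm]; simp
        rw [hcond, if_pos rfl, hisin]
      · have hmfalse : (decide ((c :: rest) ≠ []) && ((c :: rest) == (s.drop iN).take (c :: rest).length)) = false := by
          rw [beq_eq_false_iff_ne.mpr hm, Bool.and_false]
        rw [hmfalse, if_neg (by simp)]
        rw [ih (s.drop (iN + 1)).length (by simp only [List.length_drop]; omega) _ rfl]
        cases hR : PySem.Chars.isIn (c :: rest) s
        · -- no occurrence in s, hence none in its suffix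
          cases hL : PySem.Chars.isIn (c :: rest) (s.drop (iN + 1))
          · rfl
          · exfalso
            have hinf : (c :: rest) <:+: s :=
              (PySem.Chars.isIn_iff_infix _ _).mp hL |>.trans (List.drop_suffix (iN+1) s).isInfix
            rw [PySem.Chars.isIn_eq_false_iff] at hR
            exact hR hinf
        · -- an occurrence at some j; j > iN since j ≠ iN (mismatch) and j ≥ iN (find is minimal)
          obtain ⟨j, hj⟩ := (infix_iff_exists_drop _ s).mp ((PySem.Chars.isIn_iff_infix _ _).mp hR)
          have hjiN : iN < j := by
            rcases Nat.lt_trichotomy j iN with hlt | heq | hgt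
            · exfalso
              have hc : [c] <+: s.drop j := by
                rcases hj with ⟨t2, ht2⟩
                exact ⟨rest ++ t2, by rw [← ht2]; simp⟩
              exact hfspec.2 j hlt hc
            · exact absurd (List.prefix_iff_eq_take.mp (heq ▸ hj)) hm
            · exact hgt
          have hpre2 : (c :: rest) <+: (s.drop (iN + 1)).drop (j - (iN + 1)) := by
            rw [List.drop_drop]
            have heq : iN + 1 + (j - (iN + 1)) = j := by omega
            rw [heq]
            exact hj
          rw [PySem.Chars.isIn_iff_infix, infix_iff_exists_drop]
          exact ⟨j - (iN + 1), hpre2⟩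
    · rw [dif_neg hf]
      rw [not_not, PySem.Chars.find_eq_neg_one_iff] at hf
      cases hR : PySem.Chars.isIn (c :: rest) s
      · rfl
      · exfalso
        obtain ⟨j, t2, ht2⟩ := (infix_iff_exists_drop _ s).mp ((PySem.Chars.isIn_iff_infix _ _).mp hR)
        have hc : [c] <+: s.drop j := ⟨rest ++ t2, by rw [← ht2]; simp⟩
        exact hf (hc.isInfix.trans (List.drop_suffix j s).isInfix)
  · rw [dif_neg hg]
    cases hR : PySem.Chars.isIn (c :: rest) s
    · rfl
    · exfalso
      have hlen := ((PySem.Chars.isIn_iff_infix _ _).mp hR).length_le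
      simp only [not_and_or, not_not, not_le] at hg
      rcases hg with rfl | hlt
      · simp at hlen
      · simp only [List.length_cons] at hlen hlt; omega

-- last-element characterisations of B's anchor tests on a nonempty pattern
theorem startswith_caret (c0 : Char) (rest : List Char) :
    PySem.Chars.startswith (c0 :: rest) ['^'] = decide (c0 = '^') := by
  by_cases h : c0 = '^'
  · subst h
    have := (PySem.Chars.startswith_iff ('^' :: rest) ['^']).mpr ⟨rest, rfl⟩
    simp [this]
  · have hx : PySem.Chars.startswith (c0 :: rest) ['^'] = false := by
      cases hs : PySem.Chars.startswith (c0 :: rest) ['^']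
      · rfl
      · obtain ⟨t2, ht2⟩ := (PySem.Chars.startswith_iff _ _).mp hs
        simp only [List.cons_append, List.nil_append, List.cons.injEq] at ht2
        exact absurd ht2.1.symm h
    simp [hx, h]

theorem endswith_dollar (c0 : Char) (rest : List Char) :
    PySem.Chars.endswith (c0 :: rest) ['$'] =
      decide ((c0 :: rest).getLast (List.cons_ne_nil c0 rest) = '$') := by
  have hdrop : (c0 :: rest).drop ((c0 :: rest).length - 1)
      = [(c0 :: rest).getLast (List.cons_ne_nil c0 rest)] :=
    List.drop_length_sub_one (List.cons_ne_nil c0 rest)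
  by_cases h : (c0 :: rest).getLast (List.cons_ne_nil c0 rest) = '$'
  · have hsuf : ['$'] <:+ (c0 :: rest) := by
      rw [List.suffix_iff_eq_drop, List.length_singleton, hdrop, h]
    have := (PySem.Chars.endswith_iff _ _).mpr hsuf
    simp [this, h]
  · have hx : PySem.Chars.endswith (c0 :: rest) ['$'] = false := by
      cases hs : PySem.Chars.endswith (c0 :: rest) ['$']
      · rfl
      · have hd := List.suffix_iff_eq_drop.mp ((PySem.Chars.endswith_iff _ _).mp hs)
        rw [List.length_singleton, hdrop] at hd
        simp only [List.cons.injEq, and_true] at hd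
        exact absurd hd.symm h
    simp [hx, h]

-- ===== VERDICT (by name: the statement is the Claim_ definition above) =====
theorem regex_matching_spec : Claim_equal_regex_matching := by
  intro pattern test _ hpre
  unfold Spec_regex_matching regex_matching regex_matching_alt
  unfold Pre_regex_matching at hpre
  obtain ⟨c0, rest, hp⟩ := List.exists_cons_of_ne_nil hpre
  rw [hp]
  rw [pvRegexA, pvRegexB]
  rw [startswith_caret, endswith_dollar]
  by_cases h1 : c0 = '^' <;>
    by_cases h2 : (c0 :: rest).getLast (List.cons_ne_nil c0 rest) = '$'
  · -- ^…$
    subst h1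
    rw [if_pos ⟨rfl, h2⟩, if_pos (by simp), if_pos (decide_eq_true h2)]
    exact pvCompare_eq _ _
  · -- ^… only
    subst h1
    rw [if_neg (by tauto), if_pos rfl, if_pos (by simp), if_neg (by simp [h2])]
    rw [PySem.List.slice_from_one, List.tail_cons]
    have hcast : (('^' :: rest).length : Int) - 1 = ((rest.length : Nat) : Int) := by
      simp only [List.length_cons]; omega
    rw [hcast, PySem.List.slice_to_natCast]
    exact pvCompare_eq_prefix rest test.toList
  · -- …$ only
    rw [if_neg (by tauto), if_neg h1, if_pos h2, if_neg (by simp [h1]),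
        if_pos (decide_eq_true h2)]
    rw [PySem.List.slice_to_neg_one]
    have hal : (c0 :: rest).dropLast.length = rest.length := by simp
    by_cases hk : (c0 :: rest).dropLast.length ≤ test.toList.length
    · have hidx : (test.toList.length : Int) - ((c0 :: rest).length : Int) + 1
          = ((test.toList.length - (c0 :: rest).dropLast.length : Nat) : Int) := by
        simp only [List.length_cons]
        omega
      rw [hidx, PySem.List.slice_from test.toList (Int.natCast_nonneg _), Int.toNat_natCast]
      exact pvCompare_eq_suffix (c0 :: rest).dropLast test.toList
    · rw [PySem.List.slice_some_none, pvCompare_eq]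
      have hne : ((c0 :: rest).dropLast == test.toList.drop (PySem.List.clampIdx test.toList.length
          ((test.toList.length : Int) - ((c0 :: rest).length : Int) + 1))) = false := by
        rw [beq_eq_false_iff_ne]
        intro heq
        have := congrArg List.length heq
        simp only [List.length_drop] at this
        omega
      have hew2 : PySem.Chars.endswith test.toList (c0 :: rest).dropLast = false := by
        cases hs : PySem.Chars.endswith test.toList (c0 :: rest).dropLast
        · rfl
        · have := ((PySem.Chars.endswith_iff _ _).mp hs).length_le
          omega
      rw [hne, hew2]
  · -- no anchors: the search loop is substring containment
    rw [if_neg (by tauto), if_neg h1, if_neg h2, if_neg (by simp [h1]), if_neg (by simp [h2])]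
    exact pvSearchLoop_eq_isIn (c0 :: rest) (List.cons_ne_nil c0 rest) test.toList
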